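-- pv_equiv track=rewrite | github.com/xinsfang/libleak | check_libleak.py | group_lines_by_last_column
-- ===== SOURCE A (Python) =====
-- def group_lines_by_last_column(lines):
--     grouped_lines = {}
--     for line in lines:
--         columns = line.split()
--         key = columns[-1]
--         if key not in grouped_lines:
--             grouped_lines[key] = []
--         grouped_lines[key].append(line)
--     return grouped_lines
-- ===== SOURCE B (Python) =====
-- def group_lines_by_last_column(lines):
--     result = {}
--     remaining = lines
--     while remaining:
--         key = remaining[0].split()[-1]
--         result[key] = [l for l in remaining if l.split()[-1] == key]
--         remaining = [l for l in remaining if l.split()[-1] != key]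
--     return result
-- ===== Notes on version B (the rewrite author's own statement) =====
-- stated objective: alternative
-- what changed: Replaces the single-pass dict-append loop by repeated partitioning: while lines remain, take the first line's last column as key, emit that whole group with one filter and continue on the lines with a different key (key order and within-group order are preserved).
import Mathlib
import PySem

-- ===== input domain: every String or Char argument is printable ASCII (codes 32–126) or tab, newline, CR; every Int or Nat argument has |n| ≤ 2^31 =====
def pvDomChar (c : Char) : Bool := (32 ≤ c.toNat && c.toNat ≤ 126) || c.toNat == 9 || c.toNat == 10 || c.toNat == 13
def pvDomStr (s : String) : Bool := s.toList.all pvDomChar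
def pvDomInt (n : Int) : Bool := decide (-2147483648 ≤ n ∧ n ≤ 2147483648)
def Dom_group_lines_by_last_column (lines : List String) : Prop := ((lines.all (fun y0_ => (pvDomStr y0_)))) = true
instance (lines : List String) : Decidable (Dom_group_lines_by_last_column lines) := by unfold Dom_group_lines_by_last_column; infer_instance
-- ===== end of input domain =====

-- B groups by repeatedly partitioning the remaining lines on the first line's key instead of
-- a single hash-dict pass (objective: alternative decomposition, not claimed faster).
-- Both raise IndexError on a line with no columns; those inputs are outside Pre_.

-- ===== PORT A =====
-- line.split()[-1]; none exactly where Python raises IndexError (empty split)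
def pvLastCol? (line : String) : Option String :=
  PySem.List.pyGet? (PySem.Str.split₀ line) (-1)

def group_lines_by_last_column (lines : List String) : List (String × List String) :=
  (lines.foldl (fun d line =>
      match pvLastCol? line with
      | none => d        -- Python raises IndexError here; excluded by Pre_
      | some key =>
        let d' := if d.contains key then d else d.insert key ([] : List String)
        d'.modify key [] (fun xs => xs ++ [line]))
    (PySem.Dict.empty : PySem.Dict String (List String))).items

-- ===== PORT B =====
def pvGroupLoop (remaining : List String) (result : PySem.Dict String (List String)) :
    PySem.Dict String (List String) :=
  match remaining with
  | [] => result
  | l0 :: tl =>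
    match hmatch : pvLastCol? l0 with
    | none => result     -- Python raises IndexError here; excluded by Pre_
    | some k =>
      pvGroupLoop ((l0 :: tl).filter (fun l => !(pvLastCol? l == some k)))
        (result.insert k ((l0 :: tl).filter (fun l => pvLastCol? l == some k)))
termination_by remaining.length
decreasing_by
  simp only [List.filter_cons, hmatch, beq_self_eq_true, Bool.not_true, List.length_cons]
  exact Nat.lt_succ_of_le (List.length_filter_le _ _)

def group_lines_by_last_column_alt (lines : List String) : List (String × List String) :=
  (pvGroupLoop lines PySem.Dict.empty).items

-- ===== PRECONDITION & SPEC =====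
-- Pre_ excludes lines consisting only of whitespace (or empty), on which Python A raises IndexError.
def Pre_group_lines_by_last_column (lines : List String) : Prop :=
  ∀ l ∈ lines, PySem.Str.split₀ l ≠ []
instance (lines : List String) : Decidable (Pre_group_lines_by_last_column lines) := by
  unfold Pre_group_lines_by_last_column; infer_instance

def pvWitness_group_lines_by_last_column : List String := ["a x", "b y", "c x"]

def Spec_group_lines_by_last_column (lines : List String) (out : List (String × List String)) : Prop := out = group_lines_by_last_column_alt lines
instance (lines : List String) (out : List (String × List String)) : Decidable (Spec_group_lines_by_last_column lines out) := by unfold Spec_group_lines_by_last_column; infer_instance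

-- ===== CLAIM (what is proved, stated in full; the proofs are below) =====
def Claim_equal_group_lines_by_last_column : Prop := ∀ (lines : List String), Dom_group_lines_by_last_column lines → Pre_group_lines_by_last_column lines → Spec_group_lines_by_last_column lines (group_lines_by_last_column lines)

-- ===== LEMMAS AND PROOFS =====

-- the key of a line, as a String (proof-side helper)
def pvKf (l : String) : String := (pvLastCol? l).getD ""

theorem pvLastCol?_eq_some (l : String) (h : PySem.Str.split₀ l ≠ []) :
    pvLastCol? l = some (pvKf l) := by
  cases hx : PySem.Str.split₀ l with
  | nil => exact absurd hx h
  | cons a tl =>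
    simp [pvKf, pvLastCol?, hx, PySem.List.pyGet?, PySem.List.pyIdx?]

-- A's "if key not in d: d[key]=[]" followed by append is a plain modify
theorem pv_step_eq (d : PySem.Dict String (List String)) (k : String)
    (f : List String → List String) :
    (if d.contains k then d else d.insert k ([] : List String)).modify k [] f
      = d.modify k [] f := by
  by_cases hc : d.contains k
  · simp [hc]
  · simp only [hc, Bool.false_eq_true, if_false]
    unfold PySem.Dict.modify
    rw [PySem.Dict.getD_insert_self, PySem.Dict.insert_insert_self,
      PySem.Dict.getD_of_not_contains d [] (by simpa using hc)]

theorem pv_discard_ofList (xs : List String) (a : String) :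
    PySem.Set.discard (PySem.Set.ofList xs) a
      = PySem.Set.ofList (xs.filter (fun y => !(y == a))) := by
  induction xs with
  | nil => rfl
  | cons x xs ih =>
    by_cases hxa : x = a
    · subst hxa
      rw [PySem.Set.ofList_cons]
      simp only [PySem.Set.discard] at ih ⊢
      simp only [List.filter_cons, beq_self_eq_true, Bool.not_true, Bool.false_eq_true,
        if_false, List.filter_filter, Bool.and_self]
      exact ih
    · have hbeq : (x == a) = false := beq_eq_false_iff_ne.mpr hxa
      rw [show List.filter (fun y => !(y == a)) (x :: xs)
            = x :: List.filter (fun y => !(y == a)) xs from by simp [hbeq]]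
      rw [PySem.Set.ofList_cons, PySem.Set.ofList_cons, ← ih]
      simp only [PySem.Set.discard, List.filter_cons, hbeq, Bool.not_false, if_true,
        List.filter_filter]
      exact congrArg (List.cons x)
        (List.filter_congr fun y _ => by cases h1 : y == a <;> cases h2 : y == x <;> rfl)

-- values of the clean modify-append loop
theorem pv_getD_loop (lines : List String) (d : PySem.Dict String (List String)) (c : String) :
    (lines.foldl (fun d l => d.modify (pvKf l) [] (fun xs => xs ++ [l])) d).getD c []
      = d.getD c [] ++ (lines.filter (fun l => pvKf l == c)) := by
  have hmap : lines.foldl (fun d l => d.modify (pvKf l) [] (fun xs => xs ++ [l])) d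
      = (lines.map (fun l => (pvKf l, l))).foldl
          (fun d p => d.modify p.1 [] (fun xs => xs ++ [p.2])) d := by
    rw [List.foldl_map]
  rw [hmap, PySem.Dict.getD_foldl_modify_append]
  simp [List.filter_map, Function.comp_def, List.map_map]

-- characterization of port A on Pre_
theorem pv_A_char (lines : List String) (hpre : ∀ l ∈ lines, PySem.Str.split₀ l ≠ []) :
    group_lines_by_last_column lines
      = (PySem.Set.ofList (lines.map pvKf)).map
          (fun k => (k, lines.filter (fun l => pvKf l == k))) := by
  unfold group_lines_by_last_column
  have hcongr : lines.foldl (fun d line =>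
      match pvLastCol? line with
      | none => d
      | some key =>
        let d' := if d.contains key then d else d.insert key ([] : List String)
        d'.modify key [] (fun xs => xs ++ [line]))
      (PySem.Dict.empty : PySem.Dict String (List String))
      = lines.foldl (fun d l => d.modify (pvKf l) [] (fun xs => xs ++ [l]))
          PySem.Dict.empty := by
    apply PySem.List.foldl_congr_mem
    intro d l hl
    rw [pvLastCol?_eq_some l (hpre l hl)]
    exact pv_step_eq d (pvKf l) _
  rw [hcongr]
  have hnd : (lines.foldl (fun d l => d.modify (pvKf l) [] (fun xs => xs ++ [l]))
      (PySem.Dict.empty : PySem.Dict String (List String))).keys.Nodup :=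
    PySem.Dict.nodup_keys_foldl_modify_key lines pvKf [] (fun _ l xs => xs ++ [l]) _
      PySem.Dict.nodup_keys_empty
  rw [PySem.Dict.items_eq_map_keys _ hnd []]
  rw [PySem.Dict.keys_foldl_modify_key]
  rw [show (PySem.Dict.empty : PySem.Dict String (List String)).keys = [] from rfl]
  rw [PySem.Set.update_nil_left]
  exact List.map_congr_left fun k _ => by
    rw [pv_getD_loop]
    simp [PySem.Dict.getD_empty]

-- characterization of port B's loop on Pre_
theorem pv_B_char : ∀ (n : Nat) (lines : List String) (d : PySem.Dict String (List String)),
    lines.length ≤ n →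
    (∀ l ∈ lines, PySem.Str.split₀ l ≠ []) →
    d.keys.Nodup →
    (∀ l ∈ lines, pvKf l ∉ d.keys) →
    (pvGroupLoop lines d).items
      = d.items ++ (PySem.Set.ofList (lines.map pvKf)).map
          (fun k => (k, lines.filter (fun l => pvKf l == k))) := by
  intro n
  induction n with
  | zero =>
    intro lines d hlen _ _ _
    have : lines = [] := List.eq_nil_of_length_eq_zero (Nat.le_zero.mp hlen)
    subst this
    simp [pvGroupLoop]
  | succ n ih =>
    intro lines d hlen hpre hnd hdisj
    cases lines with
    | nil => simp [pvGroupLoop]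
    | cons l0 tl =>
      have h0 : pvLastCol? l0 = some (pvKf l0) :=
        pvLastCol?_eq_some l0 (hpre l0 (List.mem_cons_self))
      set k0 := pvKf l0 with hk0
      rw [pvGroupLoop]
      split
      next heq => rw [h0] at heq; simp at heq
      next k heq =>
      rw [h0] at heq
      have hk : k0 = k := Option.some.inj heq
      subst hk
      -- rewrite the two filters through pvKf
      have hfpos : (l0 :: tl).filter (fun l => pvLastCol? l == some k0)
          = (l0 :: tl).filter (fun l => pvKf l == k0) :=
        List.filter_congr fun l hl => by rw [pvLastCol?_eq_some l (hpre l hl)]; simp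
      have hfneg : (l0 :: tl).filter (fun l => !(pvLastCol? l == some k0))
          = tl.filter (fun l => !(pvKf l == k0)) := by
        rw [List.filter_congr (fun l hl => by
          rw [pvLastCol?_eq_some l (hpre l hl)]
          rfl : ∀ l ∈ l0 :: tl, (!(pvLastCol? l == some k0)) = (!(pvKf l == k0)))]
        simp [← hk0]
      rw [hfpos, hfneg]
      have hk0nd : k0 ∉ d.keys := hdisj l0 (List.mem_cons_self)
      have hcont : d.contains k0 = false := by
        rw [← Bool.not_eq_true, PySem.Dict.contains_iff_mem_keys]; exact hk0nd
      set rest := tl.filter (fun l => !(pvKf l == k0)) with hrest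
      set same := (l0 :: tl).filter (fun l => pvKf l == k0) with hsame
      have hih := ih rest (d.insert k0 same)
        (le_trans (List.length_filter_le _ _) (Nat.le_of_succ_le_succ hlen))
        (fun l hl => hpre l (List.mem_cons_of_mem _ (List.mem_of_mem_filter hl)))
        (by rw [PySem.Dict.keys_insert_of_not_contains _ _ hcont, List.nodup_append]
            refine ⟨hnd, List.nodup_singleton _, ?_⟩
            intro a ha b hb hab
            exact hk0nd ((hab.symm ▸ (List.mem_singleton.mp hb)) ▸ ha))
        (by intro l hl
            rw [PySem.Dict.keys_insert_of_not_contains _ _ hcont]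
            have h1 : pvKf l ∉ d.keys :=
              hdisj l (List.mem_cons_of_mem _ (List.mem_of_mem_filter hl))
            have h2' : pvKf l ≠ k0 := by
              rw [hrest] at hl
              have h2 := (List.mem_filter.mp hl).2
              simpa using h2
            simp [List.mem_append, h1, h2'])
      rw [hih, PySem.Dict.items_insert_of_not_contains _ _ hcont]
      rw [List.append_assoc]
      congr 1
      -- key list: ofList ((l0::tl).map pvKf) = k0 :: ofList (rest.map pvKf)
      have hkeys : PySem.Set.ofList ((l0 :: tl).map pvKf)
          = k0 :: PySem.Set.ofList (rest.map pvKf) := by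
        rw [List.map_cons, PySem.Set.ofList_cons, pv_discard_ofList, hrest]
        rw [List.filter_map]
        rfl
      rw [hkeys, List.map_cons, List.singleton_append]
      congr 1
      apply List.map_congr_left
      intro k hk
      have hkne : k ≠ k0 := by
        rcases List.mem_map.mp ((PySem.Set.mem_ofList _ _).mp hk) with ⟨l, hl, hlk⟩
        rw [hrest] at hl
        have h2 : pvKf l ≠ k0 := by
          have := (List.mem_filter.mp hl).2
          simpa using this
        rw [← hlk]; exact h2
      have hhead : (pvKf l0 == k) = false := by
        rw [← hk0]; exact beq_eq_false_iff_ne.mpr (Ne.symm hkne)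
      apply congrArg (Prod.mk k)
      rw [hrest, List.filter_filter, List.filter_cons, hhead]
      simp only [Bool.false_eq_true, if_false]
      exact List.filter_congr fun l _ => by
        cases h : pvKf l == k
        · simp
        · have hlk2 : pvKf l = k := by simpa using h
          simp [hlk2, beq_eq_false_iff_ne.mpr hkne]

-- ===== VERDICT (by name: the statement is the Claim_ definition above) =====
theorem group_lines_by_last_column_spec : Claim_equal_group_lines_by_last_column := by
  intro lines _ hpre
  unfold Spec_group_lines_by_last_column group_lines_by_last_column_alt
  rw [pv_A_char lines hpre]
  rw [pv_B_char lines.length lines PySem.Dict.empty le_rfl hpre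
    PySem.Dict.nodup_keys_empty (by simp [show (PySem.Dict.empty : PySem.Dict String (List String)).keys = [] from rfl])]
  rfl
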